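-- pv_equiv track=rewrite | github.com/vzucchetti/analysis-covid-rs | main.py | cityWithMostNewCases
-- ===== SOURCE A (Python) =====
-- def cityWithMostNewCases(list):
--     city = list[0][0]
--     most = list[0][2]
--     for item in list:
--         if item[2] > most:
--             most = item[2]
--             city = item[0]
--     return city
-- ===== SOURCE B (Python) =====
-- def cityWithMostNewCases(list):
--     return sorted(list, key=lambda item: item[2], reverse=True)[0][0]
-- ===== Notes on version B (the rewrite author's own statement) =====
-- stated objective: alternative
-- what changed: Replaces the running-max accumulator scan with a stable descending sort on the new-cases key and picking the first element; sort stability reproduces A's strict-> first-max tie-break.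
import Mathlib
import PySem

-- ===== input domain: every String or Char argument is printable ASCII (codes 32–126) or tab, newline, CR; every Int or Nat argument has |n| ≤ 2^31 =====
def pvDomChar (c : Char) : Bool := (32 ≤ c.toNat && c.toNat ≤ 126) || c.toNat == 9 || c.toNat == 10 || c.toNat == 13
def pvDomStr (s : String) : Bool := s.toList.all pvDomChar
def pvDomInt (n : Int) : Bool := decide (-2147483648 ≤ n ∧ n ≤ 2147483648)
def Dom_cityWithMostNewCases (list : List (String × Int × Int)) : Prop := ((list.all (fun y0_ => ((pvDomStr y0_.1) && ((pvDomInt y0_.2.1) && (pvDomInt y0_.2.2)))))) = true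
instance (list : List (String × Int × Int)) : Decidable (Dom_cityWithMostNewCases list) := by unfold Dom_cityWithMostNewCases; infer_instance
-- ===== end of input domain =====

-- B replaces A's running-max scan by a stable descending sort plus taking the head ('alternative'); equivalence proved on nonempty lists.

-- ===== PORT A =====
-- city = list[0][0]; most = list[0][2]; loop updating on item[2] > most
def cityWithMostNewCases (list : List (String × Int × Int)) : String :=
  match list with
  | [] => ""  -- list[0] raises IndexError; excluded by Pre_
  | x :: _ =>
    (list.foldl
      (fun (st : String × Int) item =>
        if item.2.2 > st.2 then (item.1, item.2.2) else st)
      (x.1, x.2.2)).1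

-- ===== PORT B =====
-- sorted(list, key=lambda item: item[2], reverse=True)[0][0]
def cityWithMostNewCases_alt (list : List (String × Int × Int)) : String :=
  match PySem.List.sorted list (fun item => item.2.2) true with
  | [] => ""  -- [0] raises IndexError; excluded by Pre_
  | h :: _ => h.1

-- ===== PRECONDITION & SPEC =====
-- A raises IndexError on the empty list (list[0]); those inputs are excluded.
def Pre_cityWithMostNewCases (list : List (String × Int × Int)) : Prop := list ≠ []
instance (list : List (String × Int × Int)) : Decidable (Pre_cityWithMostNewCases list) := by unfold Pre_cityWithMostNewCases; infer_instance
def pvWitness_cityWithMostNewCases : (List (String × Int × Int)) := [("Porto Alegre", 10, 3), ("Canoas", 5, 7)]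

def Spec_cityWithMostNewCases (list : List (String × Int × Int)) (out : String) : Prop := out = cityWithMostNewCases_alt list
instance (list : List (String × Int × Int)) (out : String) : Decidable (Spec_cityWithMostNewCases list out) := by unfold Spec_cityWithMostNewCases; infer_instance

-- ===== CLAIM (what is proved, stated in full; the proofs are below) =====
def Claim_equal_cityWithMostNewCases : Prop := ∀ (list : List (String × Int × Int)), Dom_cityWithMostNewCases list → Pre_cityWithMostNewCases list → Spec_cityWithMostNewCases list (cityWithMostNewCases list)

-- ===== LEMMAS AND PROOFS =====

-- the element-level step that both programs' head/state obey
def pvStep (a x : String × Int × Int) : String × Int × Int :=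
  if a.2.2 < x.2.2 then x else a

-- the reverse=True comparator PySem.List.sorted uses for key item.2.2
def pvBef (x y : String × Int × Int) : Bool := decide (y.2.2 < x.2.2)

theorem pv_insertBy_cons (x y : String × Int × Int) (ys : List (String × Int × Int)) :
    PySem.List.insertBy pvBef x (y :: ys) =
      if pvBef x y then x :: y :: ys else y :: PySem.List.insertBy pvBef x ys := by
  simp [PySem.List.insertBy]

-- head of the insertion-sort foldl evolves exactly by pvStep
theorem pv_head_foldl_insert (xs : List (String × Int × Int)) :
    ∀ (a : String × Int × Int) (t : List (String × Int × Int)),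
      ∃ t', List.foldl (fun acc x => PySem.List.insertBy pvBef x acc) (a :: t) xs
              = (xs.foldl pvStep a) :: t' := by
  induction xs with
  | nil => intro a t; exact ⟨t, rfl⟩
  | cons x xs ih =>
    intro a t
    simp only [List.foldl]
    rw [pv_insertBy_cons]
    by_cases h : a.2.2 < x.2.2
    · have : pvBef x a = true := by simp [pvBef, h]
      simp only [this, if_true, pvStep, if_pos h]
      exact ih x (a :: t)
    · have : pvBef x a = false := by simp [pvBef, h]
      simp only [this, pvStep, if_neg h]
      exact ih a (PySem.List.insertBy pvBef x t)

-- A's (city, most) pair fold is the projection of the element fold by pvStep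
theorem pv_pair_foldl (l : List (String × Int × Int)) :
    ∀ (y : String × Int × Int),
      l.foldl (fun (st : String × Int) item =>
          if item.2.2 > st.2 then (item.1, item.2.2) else st) (y.1, y.2.2)
        = ((l.foldl pvStep y).1, (l.foldl pvStep y).2.2) := by
  induction l with
  | nil => intro y; rfl
  | cons x l ih =>
    intro y
    simp only [List.foldl, pvStep]
    by_cases h : y.2.2 < x.2.2
    · rw [if_pos (show x.2.2 > y.2.2 from h), if_pos h]; exact ih x
    · rw [if_neg (show ¬ x.2.2 > y.2.2 from h), if_neg h]; exact ih y

theorem pv_step_self (x : String × Int × Int) : pvStep x x = x := by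
  simp [pvStep]

-- ===== VERDICT (by name: the statement is the Claim_ definition above) =====
theorem cityWithMostNewCases_spec : Claim_equal_cityWithMostNewCases := by
  intro list _ hpre
  match list with
  | [] => exact absurd rfl hpre
  | x :: rest =>
    unfold Spec_cityWithMostNewCases cityWithMostNewCases cityWithMostNewCases_alt
    have hsorted : PySem.List.sorted (x :: rest) (fun item => item.2.2) true
        = List.foldl (fun acc y => PySem.List.insertBy pvBef y acc) [x] rest := by
      rfl
    obtain ⟨t', ht'⟩ := pv_head_foldl_insert rest x []
    rw [hsorted, ht']
    dsimp only
    rw [pv_pair_foldl (x :: rest) x]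
    simp only [List.foldl, pv_step_self]
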